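-- pv_equiv track=rewrite | github.com/ovixivo/Data-Engineer-Tech-Challenge | Section 4 - Charts & APIs/scripts/functions.py | delta_change
-- ===== SOURCE A (Python) =====
-- def delta_change(d):
--     change = {}
--     for i, (date, value) in enumerate(d.items()):
--         if i == 0:
--             change[date] = 0
--             continue
--         prev_value = list(d.values())[i - 1]
--         change[date] = value - prev_value
--         if (value - prev_value) < 0:
--             change[date] = 0
--     return change
-- ===== SOURCE B (Python) =====
-- def delta_change(d):
--     # Single pass keeping the previous value in a variable; O(n) instead of
--     # rebuilding list(d.values()) on every iteration.
--     change = {}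
--     prev = None
--     for date, value in d.items():
--         change[date] = 0 if prev is None else max(value - prev, 0)
--         prev = value
--     return change
-- ===== Notes on version B (the rewrite author's own statement) =====
-- stated objective: faster
-- what changed: B carries the previous value in a variable across one pass instead of rebuilding list(d.values()) and indexing it on every iteration, and clamps with max(.,0) instead of insert-then-overwrite.
import Mathlib
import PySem

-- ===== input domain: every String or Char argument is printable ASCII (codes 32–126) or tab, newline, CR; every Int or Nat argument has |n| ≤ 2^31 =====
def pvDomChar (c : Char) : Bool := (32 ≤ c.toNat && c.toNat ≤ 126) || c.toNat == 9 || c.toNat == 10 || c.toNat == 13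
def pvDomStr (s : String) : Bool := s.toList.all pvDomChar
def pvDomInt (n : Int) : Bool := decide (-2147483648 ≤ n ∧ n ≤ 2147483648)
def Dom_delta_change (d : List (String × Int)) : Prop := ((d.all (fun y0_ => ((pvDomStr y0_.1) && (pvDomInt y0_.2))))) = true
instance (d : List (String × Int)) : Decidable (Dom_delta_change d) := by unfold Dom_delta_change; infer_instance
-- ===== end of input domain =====

-- B replaces A's per-iteration rebuild of list(d.values()) and index lookup by a single
-- pass that carries the previous value in a variable (O(n) instead of O(n^2)).

-- the two loop bodies, named so the ports and the proofs share them
def pvStepA (d : List (String × Int)) (change : PySem.Dict String Int) (p : Int × (String × Int)) : PySem.Dict String Int :=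
  if p.1 == 0 then change.insert p.2.1 0
  else
    let prev_value := PySem.List.pyGetD (d.map Prod.snd) (p.1 - 1) 0
    let change := change.insert p.2.1 (p.2.2 - prev_value)
    if p.2.2 - prev_value < 0 then change.insert p.2.1 0 else change

def pvStepB (st : PySem.Dict String Int × Option Int) (p : String × Int) : PySem.Dict String Int × Option Int :=
  (st.1.insert p.1 (match st.2 with | none => 0 | some prev => max (p.2 - prev) 0), some p.2)

-- ===== PORT A =====
-- literal port of A: for i,(date,value) in enumerate(d.items()): …  change is a dict;
-- list(d.values())[i-1] is ported as pyGetD with default 0 — for i ≥ 1 the index is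
-- always in range, so the default is never used and the port is exact.
def delta_change (d : List (String × Int)) : List (String × Int) :=
  ((PySem.List.enumerate d).foldl (pvStepA d) PySem.Dict.empty).items

-- ===== PORT B =====
-- literal port of B: one fold carrying (dict so far, previous value); prev is None on
-- the first iteration.
def delta_change_alt (d : List (String × Int)) : List (String × Int) :=
  ((d.foldl pvStepB (PySem.Dict.empty, none)).1).items

-- ===== PRECONDITION & SPEC =====
def Spec_delta_change (d : List (String × Int)) (out : List (String × Int)) : Prop := out = delta_change_alt d
instance (d : List (String × Int)) (out : List (String × Int)) : Decidable (Spec_delta_change d out) := by unfold Spec_delta_change; infer_instance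

-- ===== CLAIM (what is proved, stated in full; the proofs are below) =====
def Claim_equal_delta_change : Prop := ∀ (d : List (String × Int)), Dom_delta_change d → Spec_delta_change d (delta_change d)

-- ===== LEMMAS AND PROOFS =====

-- value of d at index k, read off from a drop equation
lemma pvGet_of_drop (d : List (String × Int)) (k : Nat) (x : String × Int) (rest : List (String × Int))
    (h : d.drop k = x :: rest) :
    PySem.List.pyGetD (d.map Prod.snd) (k : Int) 0 = x.2 := by
  have h0 : d[k]? = some x := by
    have h1 : (d.drop k)[0]? = d[k + 0]? := List.getElem?_drop
    simpa [h] using h1.symm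
  simp [PySem.List.pyGetD_natCast, List.getD, h0]

-- one step of A (with its lookup) equals one step of B
lemma pvStep_eq (d : List (String × Int)) (k : Nat) (acc : PySem.Dict String Int)
    (x : String × Int) (rest : List (String × Int)) (hdrop : d.drop k = x :: rest) :
    (pvStepA d acc ((k : Int), x), some (PySem.List.pyGetD (d.map Prod.snd) (k : Int) 0))
      = pvStepB (acc, if k = 0 then none
            else some (PySem.List.pyGetD (d.map Prod.snd) ((k : Int) - 1) 0)) x := by
  have hval := pvGet_of_drop d k x rest hdrop
  rw [hval]
  cases k with
  | zero => simp [pvStepA, pvStepB]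
  | succ k' =>
    have hne : ¬ (k' + 1 = 0) := by omega
    have hne' : (((k' + 1 : Nat) : Int) == 0) = false := by
      simp
      omega
    simp only [pvStepA, pvStepB, hne', if_neg hne, Bool.false_eq_true, if_false]
    generalize PySem.List.pyGetD (d.map Prod.snd) (((k' + 1 : Nat) : Int) - 1) 0 = v
    by_cases hlt : x.2 - v < 0
    · rw [if_pos hlt, PySem.Dict.insert_insert_self, max_eq_right (by omega)]
    · rw [if_neg hlt, max_eq_left (by omega)]

-- the two loops agree from any aligned state
lemma pvLoop_eq (d : List (String × Int)) :
    ∀ (rest : List (String × Int)) (k : Nat) (acc : PySem.Dict String Int),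
    d.drop k = rest →
    (PySem.List.enumerate rest k).foldl (pvStepA d) acc
      = (rest.foldl pvStepB
          (acc, if k = 0 then none
                else some (PySem.List.pyGetD (d.map Prod.snd) ((k : Int) - 1) 0))).1 := by
  intro rest
  induction rest with
  | nil => intro k acc _; simp [PySem.List.enumerate_nil]
  | cons x rest ih =>
    intro k acc hdrop
    have hnext : d.drop (k + 1) = rest := by
      have h1 : List.drop 1 (List.drop k d) = List.drop (k + 1) d := List.drop_drop
      rw [hdrop] at h1
      simpa using h1.symm
    rw [PySem.List.enumerate_cons, List.foldl_cons, List.foldl_cons]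
    have ih' := ih (k + 1) (pvStepA d acc ((k : Int), x)) hnext
    have hk1 : (((k + 1 : Nat) : Int) - 1) = (k : Int) := by push_cast; ring
    rw [hk1, if_neg (by omega : ¬ (k + 1 = 0))] at ih'
    rw [show ((k : Int) + 1) = ((k + 1 : Nat) : Int) by push_cast; ring, ih',
        pvStep_eq d k acc x rest hdrop]

-- ===== VERDICT (by name: the statement is the Claim_ definition above) =====
theorem delta_change_spec : Claim_equal_delta_change := by
  intro d _
  unfold Spec_delta_change delta_change delta_change_alt
  have h := pvLoop_eq d d 0 PySem.Dict.empty (by simp)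
  simp only [Nat.cast_zero] at h
  rw [show (PySem.List.enumerate d : List (Int × (String × Int))) = PySem.List.enumerate d 0 from rfl, h]
  simp
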